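-- pv_equiv track=rewrite | github.com/nublinna/OOP_kursovaya | main.py | parse_teacher_classes
-- ===== SOURCE A (Python) =====
-- def parse_teacher_classes(classes_str):
--     """Разбитие строки для точной сортировки учителей по классам"""
--     if not classes_str:
--         return 0, classes_str
--
--     classes_str = str(classes_str).strip().upper()
--
--     numbers = []
--     current_number = ''
--
--     for char in classes_str:
--         if char.isdigit():
--             current_number += char
--         else:
--             if current_number:
--                 numbers.append(int(current_number))
--                 current_number = ''
--
--     if current_number:
--         numbers.append(int(current_number))
--
--     if numbers:
--         min_class = min(numbers)
--         return min_class, classes_str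
--     else:
--         return 0, classes_str
-- ===== SOURCE B (Python) =====
-- def parse_teacher_classes(classes_str):
--     """Разбитие строки для точной сортировки учителей по классам"""
--     if not classes_str:
--         return 0, classes_str
--
--     s = str(classes_str).strip().upper()
--     tokens = ''.join(c if c.isdigit() else ' ' for c in s).split()
--     nums = [int(t) for t in tokens]
--     return (min(nums) if nums else 0), s
-- ===== Notes on version B (the rewrite author's own statement) =====
-- stated objective: idiomatic
-- what changed: Replaced the explicit per-character accumulator state machine (current_number buffer, manual flushes) with a tokenization pipeline: map non-digit characters to spaces, str.split() into maximal digit runs, then min() over the converted list.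
-- outside the precondition, e.g. on parse_teacher_classes(None): A returns (0, None), B returns (0, None)
import Mathlib
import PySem

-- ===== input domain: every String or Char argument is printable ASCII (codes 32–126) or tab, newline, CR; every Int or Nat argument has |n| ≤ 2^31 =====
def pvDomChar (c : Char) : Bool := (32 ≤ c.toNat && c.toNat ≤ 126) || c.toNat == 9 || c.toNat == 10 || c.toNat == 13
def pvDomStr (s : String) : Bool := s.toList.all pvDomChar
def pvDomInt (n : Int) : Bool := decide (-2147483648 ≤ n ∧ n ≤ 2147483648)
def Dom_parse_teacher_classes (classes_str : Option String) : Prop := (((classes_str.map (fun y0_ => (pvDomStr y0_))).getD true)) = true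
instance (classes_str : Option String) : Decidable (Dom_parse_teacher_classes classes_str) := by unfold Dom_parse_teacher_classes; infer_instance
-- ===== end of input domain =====

-- B replaces A's per-character accumulator state machine with a map-to-spaces / split() / min() pipeline (idiomatic, same cost).

-- int(current_number) on a (non-empty, all-digit) buffer never raises; getD 0 is never hit on A's calls
def pvTokInt (t : List Char) : Int := (PySem.Int.ofChars? t).getD 0

-- ===== PORT A =====
-- one step of A's for-loop over the characters: state = (numbers, current_number)
def pvStepA (st : List Int × List Char) (c : Char) : List Int × List Char :=
  if PySem.Chars.isdigit c then (st.1, st.2 ++ [c])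
  else if st.2.isEmpty then st
  else (st.1 ++ [pvTokInt st.2], [])

def parse_teacher_classes (classes_str : Option String) : Int × String :=
  match classes_str with
  | none => (0, "")   -- Python returns (0, None), not an (Int × String): excluded by Pre_
  | some s0 =>
    if s0 = "" then (0, s0)
    else
      let s := PySem.Str.upper (PySem.Str.strip s0)   -- str(classes_str).strip().upper()
      let st := s.toList.foldl pvStepA ([], [])
      let numbers := if st.2.isEmpty then st.1 else st.1 ++ [pvTokInt st.2]
      if numbers.isEmpty then (0, s)
      else ((PySem.List.min? numbers (fun x => x)).getD 0, s)   -- min(numbers); list is non-empty here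

-- ===== PORT B =====
def parse_teacher_classes_alt (classes_str : Option String) : Int × String :=
  match classes_str with
  | none => (0, "")   -- Python returns (0, None), not an (Int × String): excluded by Pre_
  | some s0 =>
    if s0 = "" then (0, s0)
    else
      let s := PySem.Str.upper (PySem.Str.strip s0)
      -- ''.join(c if c.isdigit() else ' ' for c in s).split()
      let tokens := PySem.Chars.split₀ (s.toList.map (fun c => if PySem.Chars.isdigit c then c else ' '))
      let nums := tokens.map pvTokInt
      (if nums.isEmpty then 0 else (PySem.List.min? nums (fun x => x)).getD 0, s)

-- ===== PRECONDITION & SPEC =====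
-- Pre_ excludes only classes_str = None, where A returns (0, None): None is not a value of the declared String type.
def Pre_parse_teacher_classes (classes_str : Option String) : Prop := classes_str.isSome = true
instance (classes_str : Option String) : Decidable (Pre_parse_teacher_classes classes_str) := by unfold Pre_parse_teacher_classes; infer_instance
def pvWitness_parse_teacher_classes : Option String := some "7a, 8b"

def Spec_parse_teacher_classes (classes_str : Option String) (out : Int × String) : Prop := out = parse_teacher_classes_alt classes_str
instance (classes_str : Option String) (out : Int × String) : Decidable (Spec_parse_teacher_classes classes_str out) := by unfold Spec_parse_teacher_classes; infer_instance

-- ===== CLAIM (what is proved, stated in full; the proofs are below) =====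
def Claim_equal_parse_teacher_classes : Prop := ∀ (classes_str : Option String), Dom_parse_teacher_classes classes_str → Pre_parse_teacher_classes classes_str → Spec_parse_teacher_classes classes_str (parse_teacher_classes classes_str)

-- ===== LEMMAS AND PROOFS =====

-- A's final flush: numbers ++ the pending current_number, if any
def pvFinish (st : List Int × List Char) : List Int :=
  if st.2.isEmpty then st.1 else st.1 ++ [pvTokInt st.2]

lemma pv_go_nil (cur : List Char) (acc : List (List Char)) :
    PySem.Chars.split₀.go [] cur acc =
      if cur.isEmpty then acc.reverse else (cur.reverse :: acc).reverse := by
  rw [PySem.Chars.split₀.go]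

lemma pv_go_cons (c : Char) (rest cur : List Char) (acc : List (List Char)) :
    PySem.Chars.split₀.go (c :: rest) cur acc =
      if PySem.Chars.isspace c then
        (if cur.isEmpty then PySem.Chars.split₀.go rest [] acc
         else PySem.Chars.split₀.go rest [] (cur.reverse :: acc))
      else PySem.Chars.split₀.go rest (c :: cur) acc := by
  rw [PySem.Chars.split₀.go]

lemma pv_not_isspace_of_digit (c : Char) (h : PySem.Chars.isdigit c = true) :
    PySem.Chars.isspace c = false := by
  have hb : 48 ≤ c.toNat ∧ c.toNat ≤ 57 := by
    simp only [PySem.Chars.isdigit, Bool.and_eq_true, decide_eq_true_eq, Char.le_def] at h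
    exact ⟨h.1, h.2⟩
  simp only [PySem.Chars.isspace, Bool.or_eq_false_iff, Bool.and_eq_false_iff,
    decide_eq_false_iff_not]
  omega

-- A's loop (with its final flush) yields exactly the int values of the tokens B's split() finds
lemma pv_fold_go (cs : List Char) : ∀ (cur : List Char) (acc : List (List Char)),
    pvFinish (cs.foldl pvStepA (acc.reverse.map pvTokInt, cur.reverse))
      = (PySem.Chars.split₀.go (cs.map (fun c => if PySem.Chars.isdigit c then c else ' ')) cur acc).map pvTokInt := by
  induction cs with
  | nil =>
    intro cur acc
    cases cur with
    | nil => simp [pv_go_nil, pvFinish]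
    | cons d ds => simp [pv_go_nil, pvFinish]
  | cons c rest ih =>
    intro cur acc
    simp only [List.foldl_cons, List.map_cons, pv_go_cons]
    by_cases hd : PySem.Chars.isdigit c = true
    · have hs := pv_not_isspace_of_digit c hd
      have h1 : cur.reverse ++ [c] = (c :: cur).reverse := by simp
      simp only [pvStepA, hd, if_pos, hs, Bool.false_eq_true, if_false, h1]
      exact ih (c :: cur) acc
    · have hd' : PySem.Chars.isdigit c = false := by simpa using hd
      have hs : PySem.Chars.isspace (if PySem.Chars.isdigit c then c else ' ') = true := by
        simp [hd']; decide
      rw [hd'] at hs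
      simp only [pvStepA, hd', Bool.false_eq_true, if_false]
      cases cur with
      | nil =>
        simpa using ih [] acc
      | cons d ds =>
        have hne : ((d :: ds).reverse).isEmpty = false := by simp
        simp only [hne, Bool.false_eq_true, if_false, List.isEmpty_cons]
        have h2 : (acc.reverse.map pvTokInt) ++ [pvTokInt (d :: ds).reverse]
            = ((((d :: ds).reverse :: acc)).reverse).map pvTokInt := by simp
        rw [h2]
        simpa using ih [] ((d :: ds).reverse :: acc)

-- ===== VERDICT (by name: the statement is the Claim_ definition above) =====
theorem parse_teacher_classes_spec : Claim_equal_parse_teacher_classes := by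
  intro classes_str _ hpre
  unfold Spec_parse_teacher_classes
  match classes_str with
  | none => simp [Pre_parse_teacher_classes] at hpre
  | some s0 =>
    by_cases h0 : s0 = ""
    · simp [parse_teacher_classes, parse_teacher_classes_alt, h0]
    · have key := pv_fold_go ((PySem.Str.upper (PySem.Str.strip s0)).toList) [] []
      simp only [List.reverse_nil, List.map_nil, pvFinish] at key
      simp only [parse_teacher_classes, parse_teacher_classes_alt, h0, if_false,
        PySem.Chars.split₀] at *
      rw [key]
      split_ifs <;> rfl
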